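-- pv_equiv track=rewrite | github.com/syedaliabbas1/Tableau | test6.py | has_contradiction
-- ===== SOURCE A (Python) =====
-- def has_contradiction(branch):
--     for formula in branch:
--         if formula.startswith('~'):
--             if formula[1:] in branch:
--                 return True
--         else:
--             if '~' + formula in branch:
--                 return True
--     return False
-- ===== SOURCE B (Python) =====
-- def has_contradiction(branch):
--     seen = set()
--     negs = set()
--     for f in branch:
--         neg = f[1:] if f.startswith('~') else '~' + f
--         if neg in seen or f in negs:
--             return True
--         seen.add(f)
--         negs.add(neg)
--     return False
-- ===== Notes on version B (the rewrite author's own statement) =====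
-- stated objective: faster
-- what changed: Replaces A's per-formula linear scan of the whole branch with a single interleaved pass that maintains hash sets of formulas seen so far and of their negations, returning early on the first complementary pair.
import Mathlib
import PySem

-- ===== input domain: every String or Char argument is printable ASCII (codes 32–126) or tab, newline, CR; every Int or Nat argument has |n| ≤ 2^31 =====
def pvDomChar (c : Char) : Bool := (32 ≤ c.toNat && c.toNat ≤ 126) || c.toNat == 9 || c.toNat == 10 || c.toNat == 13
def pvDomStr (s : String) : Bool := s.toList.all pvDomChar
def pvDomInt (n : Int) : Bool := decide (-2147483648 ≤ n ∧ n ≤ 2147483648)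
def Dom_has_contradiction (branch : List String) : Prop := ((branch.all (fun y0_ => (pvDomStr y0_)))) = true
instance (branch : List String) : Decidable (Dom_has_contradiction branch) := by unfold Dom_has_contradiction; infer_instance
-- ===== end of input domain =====

-- B replaces A's quadratic scan-the-whole-branch-per-formula with one pass keeping
-- sets of seen formulas and of their negations, with early exit (objective: faster).

-- ===== PORT A =====
-- '~' + formula is ported as String.ofList ('~' :: formula.toList), exact for string concatenation.
def hasContraGoA (branch : List String) : List String → Bool
  | [] => false
  | formula :: rest =>
    if PySem.Str.startswith formula "~" then
      if (PySem.Str.slice formula (some 1) none) ∈ branch then true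
      else hasContraGoA branch rest
    else
      if (String.ofList ('~' :: formula.toList)) ∈ branch then true
      else hasContraGoA branch rest

def has_contradiction (branch : List String) : Bool :=
  hasContraGoA branch branch

-- ===== PORT B =====
def pvNeg (f : String) : String :=
  if PySem.Str.startswith f "~" then PySem.Str.slice f (some 1) none
  else String.ofList ('~' :: f.toList)

def hasContraGoB (seen negs : PySem.Set String) : List String → Bool
  | [] => false
  | f :: rest =>
    let neg := pvNeg f
    if PySem.Set.contains seen neg || PySem.Set.contains negs f then true
    else hasContraGoB (PySem.Set.add seen f) (PySem.Set.add negs neg) rest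

def has_contradiction_alt (branch : List String) : Bool :=
  hasContraGoB PySem.Set.empty PySem.Set.empty branch

-- ===== PRECONDITION & SPEC =====
def Spec_has_contradiction (branch : List String) (out : Bool) : Prop := out = has_contradiction_alt branch
instance (branch : List String) (out : Bool) : Decidable (Spec_has_contradiction branch out) := by unfold Spec_has_contradiction; infer_instance

-- ===== CLAIM (what is proved, stated in full; the proofs are below) =====
def Claim_equal_has_contradiction : Prop := ∀ (branch : List String), Dom_has_contradiction branch → Spec_has_contradiction branch (has_contradiction branch)

-- ===== LEMMAS AND PROOFS =====

-- Both programs decide: does the branch contain some formula together with its negation?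
def pvBad (l : List String) : Prop := ∃ f ∈ l, pvNeg f ∈ l

theorem pvNeg_ne_self (f : String) : pvNeg f ≠ f := by
  intro h
  have h2 := congrArg String.toList h
  unfold pvNeg at h2
  split at h2
  · rename_i hsw
    rw [PySem.Str.startswith_eq, PySem.Chars.startswith_iff] at hsw
    obtain ⟨t, ht⟩ := hsw
    simp only [PySem.Str.toList_slice, PySem.Chars.slice_eq_listSlice,
      PySem.List.slice_from_one] at h2
    have := congrArg List.length h2
    rw [← ht] at this
    simp at this
  · simp only [String.toList_ofList] at h2
    have := congrArg List.length h2
    simp at this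

theorem goA_step (branch : List String) (f : String) (rest : List String) :
    hasContraGoA branch (f :: rest) =
      if pvNeg f ∈ branch then true else hasContraGoA branch rest := by
  cases hb : PySem.Chars.startswith f.toList ['~'] <;> simp [hasContraGoA, pvNeg, hb]

theorem goA_iff (branch rest : List String) :
    hasContraGoA branch rest = true ↔ ∃ f ∈ rest, pvNeg f ∈ branch := by
  induction rest with
  | nil => simp [hasContraGoA]
  | cons f rest ih =>
    rw [goA_step]
    split
    · rename_i h; simp [h]
    · rename_i h; rw [ih]; simp [h]

theorem goB_iff (rest : List String) : ∀ (pre : List String) (seen negs : PySem.Set String),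
    (∀ x, x ∈ seen ↔ x ∈ pre) →
    (∀ x, x ∈ negs ↔ x ∈ pre.map pvNeg) →
    (∀ f ∈ pre, pvNeg f ∉ pre) →
    (hasContraGoB seen negs rest = true ↔ pvBad (pre ++ rest)) := by
  induction rest with
  | nil =>
    intro pre seen negs _ _ hpre
    simp only [hasContraGoB, List.append_nil]
    constructor
    · intro h; cases h
    · rintro ⟨f, hf, hfn⟩; exact absurd hfn (hpre f hf)
  | cons f rest ih =>
    intro pre seen negs hs hn hpre
    unfold hasContraGoB
    by_cases hc : (pvNeg f ∈ pre ∨ f ∈ pre.map pvNeg)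
    · have : (PySem.Set.contains seen (pvNeg f) || PySem.Set.contains negs f) = true := by
        rcases hc with h | h
        · simp [(hs (pvNeg f)).mpr h]
        · simp [(hn f).mpr h]
      simp only [this]
      constructor
      · intro _
        rcases hc with h | h
        · exact ⟨f, by simp, by simp [h]⟩
        · obtain ⟨g, hg, hgf⟩ := List.mem_map.mp h
          exact ⟨g, by simp [hg], by simp [hgf]⟩
      · intro _; rfl
    · push Not at hc
      obtain ⟨hc1, hc2⟩ := hc
      have hcond : (PySem.Set.contains seen (pvNeg f) || PySem.Set.contains negs f) = false := by
        simp only [Bool.or_eq_false_iff]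
        constructor
        · rw [Bool.eq_false_iff]; intro h
          exact hc1 ((hs (pvNeg f)).mp ((PySem.Set.contains_iff _ _).mp h))
        · rw [Bool.eq_false_iff]; intro h
          exact hc2 ((hn f).mp ((PySem.Set.contains_iff _ _).mp h))
      simp only [hcond, Bool.false_eq_true, if_false]
      have hrec := ih (pre ++ [f]) (PySem.Set.add seen f) (PySem.Set.add negs (pvNeg f))
        (by intro x; rw [PySem.Set.mem_add]; simp [hs x])
        (by intro x; rw [PySem.Set.mem_add]; simp [hn x])
        (by
          intro g hg hgn
          simp only [List.mem_append, List.mem_singleton] at hg hgn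
          rcases hg with hg | rfl
          · rcases hgn with hgn | hgn
            · exact hpre g hg hgn
            · exact hc2 (List.mem_map.mpr ⟨g, hg, hgn⟩)
          · rcases hgn with hgn | hgn
            · exact hc1 hgn
            · exact pvNeg_ne_self g hgn)
      rw [hrec]
      simp [pvBad]

theorem A_iff (branch : List String) : has_contradiction branch = true ↔ pvBad branch := by
  unfold has_contradiction pvBad
  exact goA_iff branch branch

theorem B_iff (branch : List String) : has_contradiction_alt branch = true ↔ pvBad branch := by
  unfold has_contradiction_alt
  have := goB_iff branch [] PySem.Set.empty PySem.Set.empty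
    (by simp [PySem.Set.empty]) (by simp [PySem.Set.empty]) (by simp)
  simpa using this

-- ===== VERDICT (by name: the statement is the Claim_ definition above) =====
theorem has_contradiction_spec : Claim_equal_has_contradiction := by
  intro branch _
  unfold Spec_has_contradiction
  have h := (A_iff branch).trans (B_iff branch).symm
  cases hA : has_contradiction branch <;> cases hB : has_contradiction_alt branch <;> simp_all
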